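-- pv_equiv track=rewrite | github.com/PatrickPatalong/Algorithmen-und-Datenstrukturen | Ü7/cocktails_solution.py | possible_cocktails
-- ===== SOURCE A (Python) =====
-- def possible_cocktails(inverse_recipes, recipes, available_ingredients):
--
--     # find recipes containing any of the available ingredients
--     cocktails = set()
--     for ingredient in available_ingredients:
--         cocktails |= set(inverse_recipes[ingredient])
--
--     # only keep cocktails that do not need additional stuff
--     available_set = set(available_ingredients)
--     result = []
--     for cocktail in cocktails:
--         if recipes[cocktail].issubset(available_set):
--             result.append(cocktail)
--
--     return result
-- ===== SOURCE B (Python) =====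
-- def possible_cocktails(inverse_recipes, recipes, available_ingredients):
--     # candidate cocktails: those mentioning any available ingredient
--     candidates = set()
--     for ingredient in available_ingredients:
--         candidates.update(inverse_recipes[ingredient])
--
--     # inverted requirement index over the candidates: ingredient -> cocktails needing it
--     requires = {}
--     for cocktail in candidates:
--         for ing in recipes[cocktail]:
--             requires.setdefault(ing, set()).add(cocktail)
--
--     # eliminate: every cocktail needing an unavailable ingredient is blocked
--     avail = set(available_ingredients)
--     blocked = set()
--     for ing, needing in requires.items():
--         if ing not in avail:
--             blocked |= needing
--
--     return [c for c in candidates if c not in blocked]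
-- ===== Notes on version B (the rewrite author's own statement) =====
-- stated objective: alternative
-- what changed: A tests each candidate cocktail individually with an issubset check against the available set; B never tests subsets: it builds an inverted requirement index (ingredient -> candidate cocktails needing it), forms a blocked set as the union of the index entries of unavailable ingredients, and returns the candidates minus the blocked set.
import Mathlib
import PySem

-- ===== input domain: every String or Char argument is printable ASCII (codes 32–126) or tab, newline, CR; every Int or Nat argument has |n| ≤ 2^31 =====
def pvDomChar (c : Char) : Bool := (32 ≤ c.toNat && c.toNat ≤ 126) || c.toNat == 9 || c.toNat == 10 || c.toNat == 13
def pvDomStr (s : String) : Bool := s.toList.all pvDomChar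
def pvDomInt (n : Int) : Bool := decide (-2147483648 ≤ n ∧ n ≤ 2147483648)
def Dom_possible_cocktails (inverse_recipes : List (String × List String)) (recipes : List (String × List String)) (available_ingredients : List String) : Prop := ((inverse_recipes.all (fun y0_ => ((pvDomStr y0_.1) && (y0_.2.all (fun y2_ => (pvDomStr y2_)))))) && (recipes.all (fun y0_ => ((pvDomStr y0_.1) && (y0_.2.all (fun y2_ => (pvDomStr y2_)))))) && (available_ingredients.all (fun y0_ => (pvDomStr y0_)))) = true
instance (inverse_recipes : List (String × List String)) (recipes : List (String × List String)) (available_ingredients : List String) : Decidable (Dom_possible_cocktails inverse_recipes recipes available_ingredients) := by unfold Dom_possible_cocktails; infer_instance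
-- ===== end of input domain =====

-- B replaces A's per-candidate issubset tests by an inverted requirement index
-- (ingredient -> cocktails needing it) and a blocked-set elimination (objective: alternative).

-- shared dict primitive: d[k] as first-match association-list lookup (total form, used under Pre_)
def pcGet (d : List (String × List String)) (k : String) : List String :=
  ((d.find? (fun p => p.1 == k)).map Prod.snd).getD []

-- ===== PORT A =====
def possible_cocktails (inverse_recipes : List (String × List String)) (recipes : List (String × List String)) (available_ingredients : List String) : List String :=
  -- cocktails: the union loop; then the filter loop over it with available_set = set(available_ingredients)
  (available_ingredients.foldl
      (fun s ingredient => PySem.Set.union s (PySem.Set.ofList (pcGet inverse_recipes ingredient)))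
      PySem.Set.empty).foldl
    (fun result cocktail =>
      if PySem.Set.issubset (pcGet recipes cocktail) (PySem.Set.ofList available_ingredients)
      then result ++ [cocktail] else result)
    []

-- ===== PORT B =====
def possible_cocktails_alt (inverse_recipes : List (String × List String)) (recipes : List (String × List String)) (available_ingredients : List String) : List String :=
  -- candidates.update(inverse_recipes[ingredient])
  let candidates : PySem.Set String := available_ingredients.foldl
      (fun s ingredient => PySem.Set.update s (pcGet inverse_recipes ingredient)) PySem.Set.empty
  -- requires.setdefault(ing, set()).add(cocktail)  =  requires[ing] = requires.get(ing, set()); .add(cocktail)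
  let requires : PySem.Dict String (PySem.Set String) := candidates.foldl
      (fun d cocktail => (pcGet recipes cocktail).foldl
          (fun d ing => PySem.Dict.modify d ing PySem.Set.empty (fun s => PySem.Set.add s cocktail)) d)
      PySem.Dict.empty
  let availS : PySem.Set String := PySem.Set.ofList available_ingredients
  -- for ing, needing in requires.items(): if ing not in avail: blocked |= needing
  let blocked : PySem.Set String := requires.items.foldl
      (fun b p => if PySem.Set.contains availS p.1 then b else PySem.Set.union b p.2)
      PySem.Set.empty
  -- [c for c in candidates if c not in blocked]
  candidates.filter (fun c => !PySem.Set.contains blocked c)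

-- ===== PRECONDITION & SPEC =====
-- Pre_: exactly the inputs where Python A raises no KeyError: every available ingredient is a
-- key of inverse_recipes, and every candidate cocktail it maps to is a key of recipes.
def Pre_possible_cocktails (inverse_recipes : List (String × List String)) (recipes : List (String × List String)) (available_ingredients : List String) : Prop :=
  ∀ ing ∈ available_ingredients,
    ing ∈ inverse_recipes.map Prod.fst ∧
    ∀ c ∈ (((inverse_recipes.find? (fun p => p.1 == ing)).map Prod.snd).getD []),
      c ∈ recipes.map Prod.fst
instance (inverse_recipes : List (String × List String)) (recipes : List (String × List String)) (available_ingredients : List String) : Decidable (Pre_possible_cocktails inverse_recipes recipes available_ingredients) := by unfold Pre_possible_cocktails; infer_instance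

def pvWitness_possible_cocktails : (List (String × List String)) × (List (String × List String)) × List String :=
  ([("gin", ["martini"]), ("vermouth", ["martini"])],
   [("martini", ["gin", "vermouth"])],
   ["gin", "vermouth"])

def Spec_possible_cocktails (inverse_recipes : List (String × List String)) (recipes : List (String × List String)) (available_ingredients : List String) (out : List String) : Prop := out = possible_cocktails_alt inverse_recipes recipes available_ingredients
instance (inverse_recipes : List (String × List String)) (recipes : List (String × List String)) (available_ingredients : List String) (out : List String) : Decidable (Spec_possible_cocktails inverse_recipes recipes available_ingredients out) := by unfold Spec_possible_cocktails; infer_instance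

-- ===== CLAIM (what is proved, stated in full; the proofs are below) =====
def Claim_equal_possible_cocktails : Prop := ∀ (inverse_recipes : List (String × List String)) (recipes : List (String × List String)) (available_ingredients : List String), Dom_possible_cocktails inverse_recipes recipes available_ingredients → Pre_possible_cocktails inverse_recipes recipes available_ingredients → Spec_possible_cocktails inverse_recipes recipes available_ingredients (possible_cocktails inverse_recipes recipes available_ingredients)

-- ===== LEMMAS AND PROOFS =====

-- A's union with set(t) equals update with t.
theorem union_ofList_eq_update (s : PySem.Set String) (t : List String) :
    PySem.Set.union s (PySem.Set.ofList t) = PySem.Set.update s t := by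
  rw [PySem.Set.union, PySem.Set.update_eq_append_filter, PySem.Set.update_eq_append_filter,
    PySem.Set.ofList_ofList]

-- the inner index-building fold: membership of getD after registering cocktail c for every ingredient of l
theorem pcInnerReq (l : List String) (d : PySem.Dict String (PySem.Set String))
    (c ing x : String) :
    x ∈ PySem.Dict.getD
        (l.foldl (fun d i => PySem.Dict.modify d i PySem.Set.empty (fun s => PySem.Set.add s c)) d)
        ing PySem.Set.empty
    ↔ x ∈ PySem.Dict.getD d ing PySem.Set.empty ∨ (x = c ∧ ing ∈ l) := by
  induction l generalizing d with
  | nil => simp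
  | cons i l ih =>
    simp only [List.foldl_cons, ih, PySem.Dict.getD_modify]
    by_cases h : ing = i
    · subst h
      simp [PySem.Set.mem_add]
      tauto
    · simp [h]

-- the outer index-building fold over the candidate list
theorem pcOuterReq (recipes : List (String × List String)) (cs : List String)
    (d : PySem.Dict String (PySem.Set String)) (ing x : String) :
    x ∈ PySem.Dict.getD
        (cs.foldl (fun d cocktail => (pcGet recipes cocktail).foldl
            (fun d ing => PySem.Dict.modify d ing PySem.Set.empty (fun s => PySem.Set.add s cocktail)) d) d)
        ing PySem.Set.empty
    ↔ x ∈ PySem.Dict.getD d ing PySem.Set.empty ∨ (x ∈ cs ∧ ing ∈ pcGet recipes x) := by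
  induction cs generalizing d with
  | nil => simp
  | cons c cs ih =>
    simp only [List.foldl_cons, ih, pcInnerReq, List.mem_cons]
    constructor
    · rintro ((h | ⟨rfl, h⟩) | ⟨h1, h2⟩) <;> tauto
    · rintro (h | ⟨(rfl | h1), h2⟩) <;> tauto

-- the built index has unique keys
theorem pcReqNodup (recipes : List (String × List String)) (cs : List String)
    (d : PySem.Dict String (PySem.Set String)) (hd : d.keys.Nodup) :
    (cs.foldl (fun d cocktail => (pcGet recipes cocktail).foldl
        (fun d ing => PySem.Dict.modify d ing PySem.Set.empty (fun s => PySem.Set.add s cocktail)) d) d).keys.Nodup := by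
  induction cs generalizing d with
  | nil => exact hd
  | cons c cs ih =>
    refine ih _ ?_
    exact PySem.Dict.nodup_keys_foldl_modify_key (pcGet recipes c) (fun i => i)
      PySem.Set.empty (fun _ _ s => PySem.Set.add s c) d hd

-- the blocked-set fold characterised
theorem pcBlockedMem (availS : PySem.Set String)
    (ps : List (String × PySem.Set String)) (b0 : PySem.Set String) (x : String) :
    x ∈ ps.foldl (fun b p => if PySem.Set.contains availS p.1 then b else PySem.Set.union b p.2) b0
    ↔ x ∈ b0 ∨ ∃ p ∈ ps, ¬(PySem.Set.contains availS p.1 = true) ∧ x ∈ p.2 := by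
  induction ps generalizing b0 with
  | nil => simp
  | cons p ps ih =>
    simp only [List.foldl_cons, ih]
    by_cases h : PySem.Set.contains availS p.1 = true
    · have hm : p.1 ∈ availS := (PySem.Set.contains_iff availS p.1).mp h
      simp [hm]
    · have hm : p.1 ∉ availS := fun hmem => h ((PySem.Set.contains_iff availS p.1).mpr hmem)
      rw [if_neg h]
      simp [PySem.Set.mem_union, hm]
      tauto

-- ===== VERDICT (by name: the statement is the Claim_ definition above) =====
theorem possible_cocktails_spec : Claim_equal_possible_cocktails := by
  intro inv recipes avail _ _
  unfold Spec_possible_cocktails possible_cocktails possible_cocktails_alt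
  simp only [union_ofList_eq_update, PySem.List.foldl_append_if_eq_filter, List.nil_append]
  set cand : PySem.Set String := avail.foldl
      (fun s ingredient => PySem.Set.update s (pcGet inv ingredient)) PySem.Set.empty with hcand
  set availS : PySem.Set String := PySem.Set.ofList avail with havailS
  set req : PySem.Dict String (PySem.Set String) := cand.foldl
      (fun d cocktail => (pcGet recipes cocktail).foldl
          (fun d ing => PySem.Dict.modify d ing PySem.Set.empty (fun s => PySem.Set.add s cocktail)) d)
      PySem.Dict.empty with hreq
  set blocked : PySem.Set String := req.items.foldl
      (fun b p => if PySem.Set.contains availS p.1 then b else PySem.Set.union b p.2)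
      PySem.Set.empty with hblocked
  apply List.filter_congr
  intro c hc
  -- membership of the built index
  have hreqmem : ∀ ing x : String,
      x ∈ PySem.Dict.getD req ing PySem.Set.empty ↔ x ∈ cand ∧ ing ∈ pcGet recipes x := by
    intro ing x
    rw [hreq, pcOuterReq]
    simp [PySem.Dict.getD_empty, PySem.Set.empty]
  have hnodup : req.keys.Nodup := by
    rw [hreq]
    exact pcReqNodup recipes cand PySem.Dict.empty (by simp)
  -- blocked membership, for x a candidate
  have hblockmem : ∀ x : String, x ∈ cand →
      (x ∈ blocked ↔ ∃ ing ∈ pcGet recipes x, ing ∉ availS) := by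
    intro x hx
    rw [hblocked, pcBlockedMem]
    simp only [PySem.Set.empty, List.not_mem_nil, false_or]
    constructor
    · rintro ⟨⟨k, v⟩, hp, hna, hxp⟩
      have hv : v = PySem.Dict.getD req k PySem.Set.empty :=
        (PySem.Dict.getD_of_mem_items req hp hnodup PySem.Set.empty).symm
      refine ⟨k, ?_, ?_⟩
      · exact ((hreqmem k x).mp (hv ▸ hxp)).2
      · rw [← PySem.Set.contains_iff]; exact hna
    · rintro ⟨ing, hing, hna⟩
      have hxg : x ∈ PySem.Dict.getD req ing PySem.Set.empty := (hreqmem ing x).mpr ⟨hx, hing⟩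
      have hcont : req.contains ing = true := by
        by_contra hct
        have hcf : req.contains ing = false := by
          cases hcb : req.contains ing
          · rfl
          · exact absurd hcb hct
        rw [PySem.Dict.getD_of_not_contains req PySem.Set.empty hcf] at hxg
        simp [PySem.Set.empty] at hxg
      have hkey : ing ∈ req.keys := (PySem.Dict.contains_iff_mem_keys req ing).mp hcont
      refine ⟨(ing, PySem.Dict.getD req ing PySem.Set.empty), ?_, ?_, hxg⟩
      · rw [PySem.Dict.items_eq_map_keys req hnodup PySem.Set.empty]
        exact List.mem_map.mpr ⟨ing, hkey, rfl⟩
      · rw [PySem.Set.contains_iff]; exact hna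
  -- pointwise: issubset test = not-blocked test
  rw [Bool.eq_iff_iff]
  rw [Bool.not_eq_eq_eq_not, Bool.not_true, Bool.eq_false_iff, Ne, PySem.Set.contains_iff]
  rw [PySem.Set.issubset_iff, hblockmem c hc]
  constructor
  · intro h hex
    obtain ⟨ing, hing, hna⟩ := hex
    exact hna (h ing hing)
  · intro h ing hing
    by_contra hna
    exact h ⟨ing, hing, hna⟩
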